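-- pv_equiv track=rewrite | github.com/mmam64358-lgtm/maria-projet | app.py | fill_chromosome
-- ===== SOURCE A (Python) =====
-- def fill_chromosome(chromosome, size, gene_pool):
--     result = chromosome[:]
--     for gene in gene_pool:
--         if len(result) >= size:
--             break
--         if gene not in result:
--             result.append(gene)
--     return result[:size]
-- ===== SOURCE B (Python) =====
-- def fill_chromosome(chromosome, size, gene_pool):
--     if size <= len(chromosome):
--         return chromosome[:size]
--     first_index = {}
--     for i in range(len(gene_pool) - 1, -1, -1):
--         first_index[gene_pool[i]] = i
--     fresh = [g for g, _ in sorted(first_index.items(), key=lambda kv: kv[1])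
--              if g not in chromosome]
--     return chromosome + fresh[:size - len(chromosome)]
-- ===== Notes on version B (the rewrite author's own statement) =====
-- stated objective: alternative
-- what changed: A's grow-and-test loop (membership against the growing result, break at size) is replaced by a backward index pass that builds a first-occurrence index map of the pool, then sorts the (gene, first index) pairs by that index, filters out chromosome genes and slices to the needed count.
import Mathlib
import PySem

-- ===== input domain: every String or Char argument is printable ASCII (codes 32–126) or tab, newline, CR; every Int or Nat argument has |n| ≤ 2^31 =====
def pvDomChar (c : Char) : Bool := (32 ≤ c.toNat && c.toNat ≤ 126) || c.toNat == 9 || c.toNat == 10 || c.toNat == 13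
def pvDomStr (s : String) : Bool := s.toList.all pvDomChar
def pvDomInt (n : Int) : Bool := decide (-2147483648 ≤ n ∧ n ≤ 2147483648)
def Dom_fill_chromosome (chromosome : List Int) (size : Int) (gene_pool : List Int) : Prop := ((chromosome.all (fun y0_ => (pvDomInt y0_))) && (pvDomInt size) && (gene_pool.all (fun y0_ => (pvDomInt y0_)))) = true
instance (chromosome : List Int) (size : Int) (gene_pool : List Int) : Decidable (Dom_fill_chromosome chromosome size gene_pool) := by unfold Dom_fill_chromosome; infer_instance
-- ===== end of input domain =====

-- B replaces A's grow-and-test loop by a different algorithm: a backward index pass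
-- builds a first-occurrence index map of the pool, the remaining (gene, index) pairs
-- are sorted by that first index, filtered against the chromosome and sliced.
-- Objective: alternative (same asymptotic cost on small gene alphabets, different strategy).

-- ===== PORT A =====
-- the for-loop of A: `result` grows, `break` once len(result) >= size
def fillA (size : Int) : List Int → List Int → List Int
  | res, [] => res
  | res, g :: gs =>
      if (res.length : Int) ≥ size then res
      else if g ∈ res then fillA size res gs
      else fillA size (res ++ [g]) gs

def fill_chromosome (chromosome : List Int) (size : Int) (gene_pool : List Int) : List Int :=
  PySem.List.slice (fillA size chromosome gene_pool) none (some size)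

-- ===== PORT B =====
def fill_chromosome_alt (chromosome : List Int) (size : Int) (gene_pool : List Int) : List Int :=
  if size ≤ (chromosome.length : Int) then
    PySem.List.slice chromosome none (some size)
  else
    -- backward pass: first_index[gene_pool[i]] = i for i = len-1 .. 0
    let first_index := (PySem.List.pyRange ((gene_pool.length : Int) - 1) (-1) (-1)).foldl
        (fun d i => d.insert (PySem.List.pyGetD gene_pool i 0) i) (PySem.Dict.empty)
    -- fresh = [g for g, _ in sorted(first_index.items(), key=lambda kv: kv[1]) if g not in chromosome]
    let fresh := ((PySem.List.sorted first_index.items (fun kv => kv.2) false).filter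
        (fun kv => !decide (kv.1 ∈ chromosome))).map (fun kv => kv.1)
    chromosome ++ PySem.List.slice fresh none (some (size - (chromosome.length : Int)))

-- ===== PRECONDITION & SPEC =====
def Spec_fill_chromosome (chromosome : List Int) (size : Int) (gene_pool : List Int) (out : List Int) : Prop := out = fill_chromosome_alt chromosome size gene_pool
instance (chromosome : List Int) (size : Int) (gene_pool : List Int) (out : List Int) : Decidable (Spec_fill_chromosome chromosome size gene_pool out) := by unfold Spec_fill_chromosome; infer_instance

-- ===== CLAIM (what is proved, stated in full; the proofs are below) =====
def Claim_equal_fill_chromosome : Prop := ∀ (chromosome : List Int) (size : Int) (gene_pool : List Int), Dom_fill_chromosome chromosome size gene_pool → Spec_fill_chromosome chromosome size gene_pool (fill_chromosome chromosome size gene_pool)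

-- ===== LEMMAS AND PROOFS =====

-- proof-only helper: the genes A appends, with `seen` the growing membership list
def dmin (seen : List Int) : List Int → List Int
  | [] => []
  | g :: gs => if g ∈ seen then dmin seen gs else g :: dmin (seen ++ [g]) gs

-- A's loop splits into "keep the chromosome" ++ "take the first (size - len) new genes"
theorem fillA_eq (size : Int) (gs : List Int) : ∀ res : List Int,
    fillA size res gs = res ++ List.take (size - res.length).toNat (dmin res gs) := by
  induction gs with
  | nil => intro res; simp [fillA, dmin]
  | cons g gs ih =>
      intro res
      by_cases hge : (res.length : Int) ≥ size
      · have : (size - res.length).toNat = 0 := by omega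
        simp [fillA, hge, this]
      · have hn : 1 ≤ (size - (res.length : Int)).toNat := by omega
        by_cases hg : g ∈ res
        · simp [fillA, hge, hg, dmin, ih res]
        · have h1 : (size - ((res ++ [g]).length : Int)).toNat
              = (size - (res.length : Int)).toNat - 1 := by
            simp; omega
          rw [show fillA size res (g :: gs) = fillA size (res ++ [g]) gs by
                simp [fillA, hge, hg]]
          rw [ih (res ++ [g]), h1]
          simp only [dmin, if_neg hg]
          rw [show (size - (res.length : Int)).toNat
              = ((size - (res.length : Int)).toNat - 1) + 1 by omega]
          simp [List.take_succ_cons, List.append_assoc]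

-- dmin is the first-occurrence enumeration filter: relative to the full pool,
-- dmin keeps exactly the genes whose enumerate index is their first index and
-- which are not excluded by `seen` (= chromosome plus the prefix already scanned)
theorem dmin_eq_enum (chromosome pool : List Int) : ∀ (xs pre seen : List Int),
    pool = pre ++ xs → (∀ g, g ∈ seen ↔ g ∈ chromosome ∨ g ∈ pre) →
    dmin seen xs = ((PySem.List.enumerate xs (pre.length : Int)).filter
        (fun p => decide (p.1 = (List.idxOf p.2 pool : Int)) && !decide (p.2 ∈ chromosome))).map
        (fun p => p.2) := by
  intro xs
  induction xs with
  | nil => intro pre seen _ _; simp [dmin, PySem.List.enumerate]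
  | cons x xs ih =>
      intro pre seen hpool hseen
      rw [PySem.List.enumerate_cons]
      have hpre' : ((pre ++ [x]).length : Int) = (pre.length : Int) + 1 := by simp
      have hsplit : pool = (pre ++ [x]) ++ xs := by simpa [List.append_assoc] using hpool
      by_cases hx : x ∈ seen
      · -- A skips x; the filter drops (pre.length, x)
        have hdrop : (decide ((pre.length : Int) = (List.idxOf x pool : Int))
            && !decide (x ∈ chromosome)) = false := by
          rcases (hseen x).1 hx with hc | hp
          · simp [hc]
          · have : List.idxOf x pool < pre.length := by
              rw [hpool, List.idxOf_append_of_mem hp]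
              exact List.idxOf_lt_length_of_mem hp
            simp only [Bool.and_eq_false_iff, decide_eq_false_iff_not]
            left; omega
        have hseen' : ∀ g, g ∈ seen ↔ g ∈ chromosome ∨ g ∈ pre ++ [x] := by
          intro g
          constructor
          · intro h
            rcases (hseen g).1 h with h' | h'
            · exact Or.inl h'
            · exact Or.inr (List.mem_append.2 (Or.inl h'))
          · intro h
            rcases h with h' | h'
            · exact (hseen g).2 (Or.inl h')
            · rcases List.mem_append.1 h' with h'' | h''
              · exact (hseen g).2 (Or.inr h'')
              · simp at h''; rw [h'']; exact hx
        have := ih (pre ++ [x]) seen hsplit hseen'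
        rw [hpre'] at this
        simp only [dmin, if_pos hx, List.filter_cons, hdrop, Bool.false_eq_true, if_false]
        exact this
      · -- A keeps x; the filter keeps (pre.length, x)
        have hxp : x ∉ pre := fun h => hx ((hseen x).2 (Or.inr h))
        have hxc : x ∉ chromosome := fun h => hx ((hseen x).2 (Or.inl h))
        have hidx : (List.idxOf x pool : Int) = (pre.length : Int) := by
          rw [hpool, List.idxOf_append_of_notMem hxp]
          simp
        have hkeep : (decide ((pre.length : Int) = (List.idxOf x pool : Int))
            && !decide (x ∈ chromosome)) = true := by
          simp [hidx, hxc]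
        have hseen' : ∀ g, g ∈ seen ++ [x] ↔ g ∈ chromosome ∨ g ∈ pre ++ [x] := by
          intro g
          simp only [List.mem_append, List.mem_singleton, hseen g]
          tauto
        have := ih (pre ++ [x]) (seen ++ [x]) hsplit hseen'
        rw [hpre'] at this
        simp only [dmin, if_neg hx, List.filter_cons, hkeep, if_true, List.map_cons]
        rw [this]

-- the backward index loop: final lookup is the FIRST index of each pool gene
theorem build_get? (p : List Int) : ∀ (d : PySem.Dict Int Int) (g : Int),
    ((PySem.List.pyRange ((p.length : Int) - 1) (-1) (-1)).foldl
        (fun d i => d.insert (PySem.List.pyGetD p i 0) i) d).get? g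
      = if g ∈ p then some (List.idxOf g p : Int) else d.get? g := by
  induction p using List.reverseRecOn with
  | nil =>
      intro d g
      rw [PySem.List.pyRange_neg_one_eq_nil (by simp)]
      simp
  | append_singleton ys y ih =>
      intro d g
      have hlen : ((ys ++ [y]).length : Int) - 1 = (ys.length : Int) := by simp
      rw [hlen, PySem.List.pyRange_neg_one_cons (by omega), List.foldl_cons]
      have hget : PySem.List.pyGetD (ys ++ [y]) (ys.length : Int) 0 = y := by
        rw [PySem.List.pyGetD_natCast]; simp
      have hcongr : (PySem.List.pyRange ((ys.length : Int) - 1) (-1) (-1)).foldl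
            (fun d i => d.insert (PySem.List.pyGetD (ys ++ [y]) i 0) i)
            (d.insert y (ys.length : Int))
          = (PySem.List.pyRange ((ys.length : Int) - 1) (-1) (-1)).foldl
            (fun d i => d.insert (PySem.List.pyGetD ys i 0) i)
            (d.insert y (ys.length : Int)) := by
        apply PySem.List.foldl_congr_mem
        intro acc i hi
        rcases PySem.List.mem_pyRange_neg_one.1 hi with ⟨h1, h2⟩
        have hnn : i = ((i.toNat : Nat) : Int) := by omega
        rw [hnn, PySem.List.pyGetD_natCast, PySem.List.pyGetD_natCast,
          List.getD_append ys [y] 0 i.toNat (by omega)]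
      rw [hget, hcongr, ih (d.insert y (ys.length : Int)) g]
      by_cases hys : g ∈ ys
      · rw [if_pos hys, if_pos (by simp [hys]), List.idxOf_append_of_mem hys]
      · by_cases hgy : g = y
        · subst hgy
          rw [if_neg hys, if_pos (by simp), List.idxOf_append_of_notMem hys,
            PySem.Dict.get?_insert_self]
          simp
        · rw [if_neg hys, if_neg (by simp [hys, hgy]),
            PySem.Dict.get?_insert_of_ne _ _ hgy]

-- A's loop stops immediately once the chromosome already has `size` elements
theorem fillA_stop (size : Int) (c gp : List Int) (h : size ≤ (c.length : Int)) :
    fillA size c gp = c := by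
  cases gp with
  | nil => simp [fillA]
  | cons g gs => simp [fillA, show (c.length : Int) ≥ size from h]

theorem fill_chromosome_main (chromosome : List Int) (size : Int) (gene_pool : List Int) :
    fill_chromosome chromosome size gene_pool = fill_chromosome_alt chromosome size gene_pool := by
  unfold fill_chromosome fill_chromosome_alt
  by_cases hle : size ≤ (chromosome.length : Int)
  · rw [if_pos hle, fillA_stop _ _ _ hle]
  · rw [if_neg hle]
    have hpos : 0 ≤ size := by omega
    -- the dict of first indices
    set d := (PySem.List.pyRange ((gene_pool.length : Int) - 1) (-1) (-1)).foldl
        (fun d i => d.insert (PySem.List.pyGetD gene_pool i 0) i)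
        (PySem.Dict.empty (κ := Int) (ν := Int)) with hd
    have hnodupk : d.keys.Nodup := by
      rw [hd]
      exact PySem.Dict.nodup_keys_foldl_insert_key _ _ _ _ (by simp)
    have hitems_nodup : d.items.Nodup := by
      apply List.Nodup.of_map (fun q : Int × Int => q.1)
      simpa [PySem.Dict.keys] using hnodupk
    have hmem : ∀ g i : Int, (g, i) ∈ d.items ↔ g ∈ gene_pool ∧ i = (List.idxOf g gene_pool : Int) := by
      intro g i
      rw [← PySem.Dict.get?_eq_some_iff_mem_items d g i hnodupk, hd, build_get?]
      by_cases hg : g ∈ gene_pool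
      · simp [hg, eq_comm]
      · simp [hg]
    -- the target item order: (gene, first index) pairs sorted by first index
    set Tsw := ((PySem.List.enumerate gene_pool 0).filter
        (fun q => decide (q.1 = (List.idxOf q.2 gene_pool : Int)))).map (fun q => (q.2, q.1)) with hTsw
    have hTpair : List.Pairwise (fun a b : Int × Int => a.1 < b.1)
        ((PySem.List.enumerate gene_pool 0).filter
          (fun q => decide (q.1 = (List.idxOf q.2 gene_pool : Int)))) :=
      List.Pairwise.sublist List.filter_sublist (PySem.List.pairwise_lt_enumerate _ _)
    have hTnodup : Tsw.Nodup := by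
      rw [hTsw]
      apply List.Nodup.map
      · intro a b hab
        cases a; cases b
        simpa [Prod.ext_iff, and_comm] using hab
      · exact hTpair.imp (fun {a b} h => by rintro rfl; exact lt_irrefl _ h)
    have hTmem : ∀ g i : Int, (g, i) ∈ Tsw ↔ g ∈ gene_pool ∧ i = (List.idxOf g gene_pool : Int) := by
      intro g i
      rw [hTsw]
      constructor
      · intro h
        rcases List.mem_map.1 h with ⟨q, hq, hqe⟩
        rcases List.mem_filter.1 hq with ⟨hqen, hqpred⟩
        rcases (PySem.List.mem_enumerate_iff _ _ _).1 hqen with ⟨k, hk, rfl⟩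
        simp only [decide_eq_true_eq] at hqpred
        have hg : gene_pool[k] = g := congrArg Prod.fst hqe
        have hi : 0 + (k : Int) = i := congrArg Prod.snd hqe
        subst hg
        refine ⟨List.getElem_mem hk, by omega⟩
      · rintro ⟨hg, rfl⟩
        have hk : List.idxOf g gene_pool < gene_pool.length := List.idxOf_lt_length_of_mem hg
        refine List.mem_map.2 ⟨((List.idxOf g gene_pool : Int), g),
          List.mem_filter.2 ⟨?_, by simp⟩, rfl⟩
        apply (PySem.List.mem_enumerate_iff _ _ _).2
        exact ⟨List.idxOf g gene_pool, hk, by simp [List.getElem_idxOf hk]⟩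
    have hperm : Tsw.Perm d.items := by
      rw [List.perm_ext_iff_of_nodup hTnodup hitems_nodup]
      rintro ⟨g, i⟩
      rw [hTmem, hmem]
    have hpair : List.Pairwise (fun a b : Int × Int => a.2 < b.2) Tsw := by
      rw [hTsw, List.pairwise_map]
      exact hTpair
    have hsorted : PySem.List.sorted d.items (fun kv : Int × Int => kv.2) false = Tsw :=
      PySem.List.sorted_eq_of_perm_of_pairwise_lt _ _ _ hperm hpair
    simp only [hsorted]
    -- fold the filter and the swap back into a single enumerate filter
    have hfresh : ((Tsw.filter (fun kv => !decide (kv.1 ∈ chromosome))).map (fun kv => kv.1))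
        = dmin chromosome gene_pool := by
      rw [hTsw, List.filter_map, List.map_map]
      rw [dmin_eq_enum chromosome gene_pool gene_pool [] chromosome (by simp) (by simp)]
      simp only [List.filter_filter]
      have hpred : ∀ a : Int × Int,
          (((fun kv => !decide (kv.1 ∈ chromosome)) ∘ fun q : Int × Int => (q.2, q.1)) a
              && decide (a.1 = (List.idxOf a.2 gene_pool : Int)))
            = (decide (a.1 = (List.idxOf a.2 gene_pool : Int)) && !decide (a.2 ∈ chromosome)) := by
        intro a; simp [Function.comp, Bool.and_comm]
      rw [List.filter_congr (fun a _ => hpred a)]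
      rfl
    rw [hfresh]
    -- both sides are chromosome ++ take (size - len) (dmin chromosome gene_pool)
    rw [fillA_eq, PySem.List.slice_to _ hpos, PySem.List.slice_to _ (by omega)]
    rw [List.take_append]
    have h1 : chromosome.take size.toNat = chromosome :=
      List.take_of_length_le (by omega)
    have h2 : size.toNat - chromosome.length = (size - (chromosome.length : Int)).toNat := by omega
    rw [h1, h2, List.take_take]
    simp

-- ===== VERDICT (by name: the statement is the Claim_ definition above) =====
theorem fill_chromosome_spec : Claim_equal_fill_chromosome := by
  intro chromosome size gene_pool _
  exact fill_chromosome_main chromosome size gene_pool
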